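-- pv_equiv track=rewrite | github.com/ksubowu/Pept-X | seq2smi.py | _shift_indices_after_removal
-- ===== SOURCE A (Python) =====
-- from typing import Dict, List, Tuple, Optional
--
-- def _shift_indices_after_removal(
--     residue_map: dict[int, int], removed: List[int]
-- ) -> dict[int, int]:
--     removed_sorted = sorted(set(removed))
--     updated: dict[int, int] = {}
--     for res_idx, atom_idx in residue_map.items():
--         if atom_idx in removed_sorted:
--             continue
--         shift = sum(1 for r in removed_sorted if r < atom_idx)
--         updated[res_idx] = atom_idx - shift
--     return updated
-- ===== SOURCE B (Python) =====
-- def _bisect_left(a, x):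
--     # CPython's bisect.bisect_left (cannot import bisect: A imports only typing)
--     lo, hi = 0, len(a)
--     while lo < hi:
--         mid = (lo + hi) // 2
--         if a[mid] < x:
--             lo = mid + 1
--         else:
--             hi = mid
--     return lo
--
--
-- def _shift_indices_after_removal(residue_map, removed):
--     removed_set = set(removed)
--     removed_sorted = sorted(removed_set)
--     return {
--         res_idx: atom_idx - _bisect_left(removed_sorted, atom_idx)
--         for res_idx, atom_idx in residue_map.items()
--         if atom_idx not in removed_set
--     }
-- ===== Notes on version B (the rewrite author's own statement) =====
-- stated objective: faster
-- what changed: Replaces the per-item linear membership test and linear 'count removed atoms below' scan over the sorted removed list with an O(1) set-membership test and a binary search (bisect_left) on the sorted removed list, emitting a dict comprehension over the surviving items.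
import Mathlib
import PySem

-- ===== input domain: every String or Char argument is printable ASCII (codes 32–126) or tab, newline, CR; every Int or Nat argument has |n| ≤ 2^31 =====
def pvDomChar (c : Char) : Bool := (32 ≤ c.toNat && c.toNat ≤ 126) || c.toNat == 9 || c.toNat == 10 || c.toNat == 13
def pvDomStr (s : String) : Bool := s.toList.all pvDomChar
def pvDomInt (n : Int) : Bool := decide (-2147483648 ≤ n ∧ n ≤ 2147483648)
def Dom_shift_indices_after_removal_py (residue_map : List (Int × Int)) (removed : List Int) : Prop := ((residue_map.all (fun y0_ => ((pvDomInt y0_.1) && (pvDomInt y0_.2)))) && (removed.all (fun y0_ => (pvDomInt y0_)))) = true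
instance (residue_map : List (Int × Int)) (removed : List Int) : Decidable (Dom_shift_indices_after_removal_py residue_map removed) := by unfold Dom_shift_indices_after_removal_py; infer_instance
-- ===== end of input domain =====

-- B replaces A's per-item linear membership test and linear "removed atoms below" scan with a
-- set-membership test and a binary search (bisect_left) over the sorted removed list (faster).


-- ===== PORT A =====
def shift_indices_after_removal_py (residue_map : List (Int × Int)) (removed : List Int) : List (Int × Int) :=
  -- removed_sorted = sorted(set(removed))
  let removed_sorted : List Int := PySem.List.sorted (PySem.Set.ofList removed) (fun x => x) false
  -- for res_idx, atom_idx in residue_map.items(): …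
  let updated : PySem.Dict Int Int :=
    residue_map.foldl (fun upd p =>
      if removed_sorted.contains p.2 then upd   -- 'if atom_idx in removed_sorted: continue'
      else
        -- shift = sum(1 for r in removed_sorted if r < atom_idx)
        let shift : Int := ((removed_sorted.filter (fun r => decide (r < p.2))).map (fun _ => (1 : Int))).sum
        upd.insert p.1 (p.2 - shift)) PySem.Dict.empty
  updated.items

-- ===== PORT B =====
-- _bisect_left in Source B is CPython's bisect_left loop, ported as the prelude's PySem.List.bisectLeft.
def shift_indices_after_removal_py_alt (residue_map : List (Int × Int)) (removed : List Int) : List (Int × Int) :=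
  let removed_set : PySem.Set Int := PySem.Set.ofList removed
  let removed_sorted : List Int := PySem.List.sorted removed_set (fun x => x) false
  -- dict comprehension: filter the surviving items, map to shifted pairs, build the dict
  (PySem.Dict.ofList ((residue_map.filter (fun p => !(removed_set.contains p.2))).map
      (fun p => (p.1, p.2 - (PySem.List.bisectLeft removed_sorted p.2 : Int))))).items

-- ===== PRECONDITION & SPEC =====
def Spec_shift_indices_after_removal_py (residue_map : List (Int × Int)) (removed : List Int) (out : List (Int × Int)) : Prop := out = shift_indices_after_removal_py_alt residue_map removed
instance (residue_map : List (Int × Int)) (removed : List Int) (out : List (Int × Int)) : Decidable (Spec_shift_indices_after_removal_py residue_map removed out) := by unfold Spec_shift_indices_after_removal_py; infer_instance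

-- ===== CLAIM (what is proved, stated in full; the proofs are below) =====
def Claim_equal_shift_indices_after_removal_py : Prop := ∀ (residue_map : List (Int × Int)) (removed : List Int), Dom_shift_indices_after_removal_py residue_map removed → Spec_shift_indices_after_removal_py residue_map removed (shift_indices_after_removal_py residue_map removed)

-- ===== LEMMAS AND PROOFS =====

-- On a ≤-sorted list, bisect_left x is exactly the number of elements below x.
lemma countP_lt_eq_bisectLeft (xs : List Int) (x : Int)
    (h : List.Pairwise (fun a b => a ≤ b) xs) :
    xs.countP (fun r => decide (r < x)) = PySem.List.bisectLeft xs x := by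
  obtain ⟨hle, hlt, hge⟩ := PySem.List.bisectLeft_spec xs x h
  set k := PySem.List.bisectLeft xs x with hk
  have hsplit := List.take_append_drop k xs
  have h1 : (xs.take k).countP (fun r => decide (r < x)) = (xs.take k).length := by
    rw [List.countP_eq_length]
    intro a ha
    obtain ⟨j, hj, rfl⟩ := List.mem_iff_getElem.mp ha
    have hj' : j < k := by
      have := hj; simp [List.length_take] at this; omega
    have hjx : j < xs.length := by
      have := hj; simp [List.length_take] at this; omega
    rw [List.getElem_take]
    simpa using hlt j hjx hj'
  have h2 : (xs.drop k).countP (fun r => decide (r < x)) = 0 := by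
    rw [List.countP_eq_zero]
    intro a ha
    obtain ⟨j, hj, rfl⟩ := List.mem_iff_getElem.mp ha
    have hjx : k + j < xs.length := by
      have := hj; simp [List.length_drop] at this; omega
    rw [List.getElem_drop]
    have := hge (k + j) hjx (by omega)
    simp; omega
  calc xs.countP (fun r => decide (r < x))
      = ((xs.take k) ++ (xs.drop k)).countP (fun r => decide (r < x)) := by rw [hsplit]
    _ = k := by
        rw [List.countP_append, h1, h2, List.length_take]
        have : k ≤ xs.length := hle
        omega

-- ===== VERDICT (by name: the statement is the Claim_ definition above) =====
theorem shift_indices_after_removal_py_spec : Claim_equal_shift_indices_after_removal_py := by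
  intro residue_map removed _hdom
  unfold Spec_shift_indices_after_removal_py
  unfold shift_indices_after_removal_py shift_indices_after_removal_py_alt
  dsimp only
  set S : PySem.Set Int := PySem.Set.ofList removed with hS
  set rs : List Int := PySem.List.sorted S (fun x => x) false with hrs
  have hpair : List.Pairwise (fun a b => a ≤ b) rs := PySem.List.sorted_pairwise S (fun x => x)
  have hperm : rs.Perm S := PySem.List.sorted_perm S (fun x => x) false
  have hmem : ∀ a : Int, rs.contains a = S.contains a := by
    intro a
    have h := hperm.mem_iff (a := a)
    simp only [PySem.Set.contains]
    rw [Bool.eq_iff_iff]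
    simp [h]
  have hshift : ∀ a : Int,
      ((rs.filter (fun r => decide (r < a))).map (fun _ => (1 : Int))).sum
        = (PySem.List.bisectLeft rs a : Int) := by
    intro a
    rw [PySem.List.sum_map_const_int, ← List.countP_eq_length_filter,
        countP_lt_eq_bisectLeft rs a hpair]
    ring
  -- rewrite A's loop body using hmem and hshift, flip the branch, turn the fold into filter+map
  have hbody : residue_map.foldl (fun upd p =>
      if rs.contains p.2 then upd
      else upd.insert p.1 (p.2 - ((rs.filter (fun r => decide (r < p.2))).map (fun _ => (1 : Int))).sum))
      PySem.Dict.empty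
      = residue_map.foldl (fun upd p =>
          if (!(S.contains p.2)) = true then upd.insert p.1 (p.2 - (PySem.List.bisectLeft rs p.2 : Int)) else upd)
        PySem.Dict.empty := by
    apply PySem.List.foldl_congr_mem
    intro acc p _
    rw [hmem, hshift]
    cases h : S.contains p.2 <;> simp
  rw [hbody, PySem.List.foldl_if_eq_foldl_filter (p := fun p : Int × Int => !(S.contains p.2))]
  show _ = (PySem.Dict.ofList _).items
  rw [PySem.Dict.ofList]
  show _ = (PySem.Dict.update PySem.Dict.empty _).items
  rw [PySem.Dict.update, List.foldl_map]
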